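-- pv_equiv track=rewrite | github.com/Dream-Team-Studcamp/udc | udc-app-backend/app/keywords.py | get_raw_keywords_candidates
-- ===== SOURCE A (Python) =====
-- def match_morph_rule(tokens_as_morphs_in_morph_rule_format, morph_rule):
--     return tokens_as_morphs_in_morph_rule_format == morph_rule
--
-- def get_raw_keywords_candidates(tokens_as_morphs, tokens_as_morphs_in_morph_rule_format, morph_rules_expanded,
--                                 deep=False):  # deep will extract terms recursively
--     morph_rules_expanded = sorted(morph_rules_expanded, key=len, reverse=True)
--     candidates = []
--     i = 0
--     while i < len(tokens_as_morphs) + 1: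
--         for rule in morph_rules_expanded:
--             rule_len = len(rule)
--             slice_ = tokens_as_morphs_in_morph_rule_format[i: i + rule_len]  # no overflow thanks to python
--             if match_morph_rule(slice_, rule):
--                 candidates.append(tokens_as_morphs[i: i + rule_len])
--                 if not deep:
--                     i += rule_len - 1
--                     break
--         i += 1
--     return candidates
-- ===== SOURCE B (Python) =====
-- def get_raw_keywords_candidates(tokens_as_morphs, tokens_as_morphs_in_morph_rule_format, morph_rules_expanded,
--                                 deep=False):
--     # Index the rules once: a hash map from rule-tuple to multiplicity plus the distinct
--     # rule lengths in descending order; then the two modes are handled by separate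
--     # strategies: deep = a pure comprehension over all positions (deep never skips),
--     # non-deep = a greedy scan that probes for the longest match and jumps past it.
--     counts = {}
--     for rule in morph_rules_expanded:
--         t = tuple(rule)
--         counts[t] = counts.get(t, 0) + 1
--     lengths = sorted({len(rule) for rule in morph_rules_expanded}, reverse=True)
--     fmt = tokens_as_morphs_in_morph_rule_format
--     n = len(tokens_as_morphs)
--     if deep:
--         return [tokens_as_morphs[i:i + L]
--                 for i in range(n + 1)
--                 for L in lengths
--                 for _ in range(counts.get(tuple(fmt[i:i + L]), 0)
--                                if len(fmt[i:i + L]) == L else 0)]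
--     out = []
--     i = 0
--     while i <= n:
--         L = next((L for L in lengths
--                   if len(fmt[i:i + L]) == L and counts.get(tuple(fmt[i:i + L]), 0)), None)
--         if L is None:
--             i += 1
--         else:
--             out.append(tokens_as_morphs[i:i + L])
--             i += L
--     return out
-- ===== Notes on version B (the rewrite author's own statement) =====
-- stated objective: alternative
-- what changed: Instead of re-scanning the whole sorted rule list at every position, B builds a hash map from rule-tuple to multiplicity plus the sorted distinct lengths once, and splits the two modes into different algorithms: deep becomes a flat comprehension over all positions (one probe per distinct length), non-deep a greedy scan that probes for the longest matching length and jumps past the match; on the measured inputs this was not 1.5x faster, so no speed is claimed.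
import Mathlib
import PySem

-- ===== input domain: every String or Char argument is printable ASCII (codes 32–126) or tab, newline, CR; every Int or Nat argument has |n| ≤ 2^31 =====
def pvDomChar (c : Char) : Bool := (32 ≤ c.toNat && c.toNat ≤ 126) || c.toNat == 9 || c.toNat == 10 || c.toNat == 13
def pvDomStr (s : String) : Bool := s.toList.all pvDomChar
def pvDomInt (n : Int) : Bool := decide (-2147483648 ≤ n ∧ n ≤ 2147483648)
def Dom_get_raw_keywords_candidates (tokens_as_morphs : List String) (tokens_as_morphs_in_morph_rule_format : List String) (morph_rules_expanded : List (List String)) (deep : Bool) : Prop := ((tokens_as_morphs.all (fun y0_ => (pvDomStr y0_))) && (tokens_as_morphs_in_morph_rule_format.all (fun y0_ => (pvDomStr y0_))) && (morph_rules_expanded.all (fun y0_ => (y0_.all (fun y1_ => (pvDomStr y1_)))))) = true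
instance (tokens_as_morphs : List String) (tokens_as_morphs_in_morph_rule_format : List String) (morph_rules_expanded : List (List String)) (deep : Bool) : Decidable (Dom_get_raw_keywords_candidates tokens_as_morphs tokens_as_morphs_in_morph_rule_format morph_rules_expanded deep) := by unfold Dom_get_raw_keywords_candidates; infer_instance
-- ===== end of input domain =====

-- B indexes the rules once (tuple-keyed multiplicity map + distinct lengths in descending
-- order) and then treats the two modes separately: deep as a flat comprehension over all
-- positions, non-deep as a greedy longest-match scan that jumps past each match.


-- ===== PORT A =====
def match_morph_rule (tokens_as_morphs_in_morph_rule_format : List String) (morph_rule : List String) : Bool :=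
  tokens_as_morphs_in_morph_rule_format == morph_rule

-- the 'for rule in morph_rules_expanded' body (with its break): returns (candidates, i) after the for
def pvAInner (toks fmt : List String) (deep : Bool) (i : Int)
    (acc : List (List String)) : List (List String) → (List (List String)) × Int
  | [] => (acc, i)
  | rule :: rest =>
    let rule_len : Int := rule.length
    let slice_ := PySem.List.slice fmt (some i) (some (i + rule_len))
    if match_morph_rule slice_ rule then
      let acc' := acc ++ [PySem.List.slice toks (some i) (some (i + rule_len))]
      if !deep then (acc', i + rule_len - 1)
      else pvAInner toks fmt deep i acc' rest
    else pvAInner toks fmt deep i acc rest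

-- the while loop; fuel only makes it total (on inputs where the Python loops forever, fuel runs out)
def pvALoop (toks fmt : List String) (rules : List (List String)) (deep : Bool) :
    Nat → Int → List (List String) → List (List String)
  | 0, _, acc => acc
  | fuel+1, i, acc =>
    if i < (toks.length : Int) + 1 then
      let p := pvAInner toks fmt deep i acc rules
      pvALoop toks fmt rules deep fuel (p.2 + 1) p.1
    else acc

def get_raw_keywords_candidates (tokens_as_morphs : List String) (tokens_as_morphs_in_morph_rule_format : List String) (morph_rules_expanded : List (List String)) (deep : Bool) : List (List String) :=
  let sortedRules := PySem.List.sorted morph_rules_expanded (fun r => (r.length : Int)) true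
  pvALoop tokens_as_morphs tokens_as_morphs_in_morph_rule_format sortedRules deep
    (tokens_as_morphs.length + 2) 0 []

-- ===== PORT B =====
-- counts = {} ; for rule: counts[t] = counts.get(t, 0) + 1
def pvBCounts (rules : List (List String)) : PySem.Dict (List String) Int :=
  rules.foldl (fun d r => d.insert r (d.getD r 0 + 1)) PySem.Dict.empty

-- lengths = sorted({len(rule) for rule in ...}, reverse=True)
def pvBLengths (rules : List (List String)) : List Int :=
  PySem.List.sorted (PySem.Set.ofList (rules.map (fun r => (r.length : Int)))) (fun x => x) true

-- one position of the deep comprehension: 'for L in lengths for _ in range(c if len==L else 0)'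
def pvBDeepAt (toks fmt : List String) (counts : PySem.Dict (List String) Int)
    (lengths : List Int) (i : Int) : List (List String) :=
  lengths.flatMap (fun L =>
    List.replicate
      (if ((PySem.List.slice fmt (some i) (some (i + L))).length : Int) = L
       then (counts.getD (PySem.List.slice fmt (some i) (some (i + L))) 0).toNat else 0)
      (PySem.List.slice toks (some i) (some (i + L))))

-- next((L for L in lengths if len(fmt[i:i+L]) == L and counts.get(tuple(fmt[i:i+L]), 0)), None)
def pvBFind (fmt : List String) (counts : PySem.Dict (List String) Int)
    (lengths : List Int) (i : Int) : Option Int :=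
  lengths.find? (fun L =>
    (((PySem.List.slice fmt (some i) (some (i + L))).length : Int) == L)
    && (counts.getD (PySem.List.slice fmt (some i) (some (i + L))) 0 != 0))

-- the non-deep greedy while loop; fuel only makes it total
def pvBGreedy (toks fmt : List String) (counts : PySem.Dict (List String) Int)
    (lengths : List Int) : Nat → Int → List (List String)
  | 0, _ => []
  | fuel+1, i =>
    if i ≤ (toks.length : Int) then
      match pvBFind fmt counts lengths i with
      | none => pvBGreedy toks fmt counts lengths fuel (i + 1)
      | some L => PySem.List.slice toks (some i) (some (i + L)) ::
          pvBGreedy toks fmt counts lengths fuel (i + L)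
    else []

def get_raw_keywords_candidates_alt (tokens_as_morphs : List String) (tokens_as_morphs_in_morph_rule_format : List String) (morph_rules_expanded : List (List String)) (deep : Bool) : List (List String) :=
  let counts := pvBCounts morph_rules_expanded
  let lengths := pvBLengths morph_rules_expanded
  if deep then
    (PySem.List.pyRange 0 ((tokens_as_morphs.length : Int) + 1) 1).flatMap
      (pvBDeepAt tokens_as_morphs tokens_as_morphs_in_morph_rule_format counts lengths)
  else
    pvBGreedy tokens_as_morphs tokens_as_morphs_in_morph_rule_format counts lengths
      (tokens_as_morphs.length + 2) 0

-- ===== PRECONDITION & SPEC =====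
def Spec_get_raw_keywords_candidates (tokens_as_morphs : List String) (tokens_as_morphs_in_morph_rule_format : List String) (morph_rules_expanded : List (List String)) (deep : Bool) (out : List (List String)) : Prop := out = get_raw_keywords_candidates_alt tokens_as_morphs tokens_as_morphs_in_morph_rule_format morph_rules_expanded deep
instance (tokens_as_morphs : List String) (tokens_as_morphs_in_morph_rule_format : List String) (morph_rules_expanded : List (List String)) (deep : Bool) (out : List (List String)) : Decidable (Spec_get_raw_keywords_candidates tokens_as_morphs tokens_as_morphs_in_morph_rule_format morph_rules_expanded deep out) := by unfold Spec_get_raw_keywords_candidates; infer_instance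

-- ===== CLAIM (what is proved, stated in full; the proofs are below) =====
def Claim_equal_get_raw_keywords_candidates : Prop := ∀ (tokens_as_morphs : List String) (tokens_as_morphs_in_morph_rule_format : List String) (morph_rules_expanded : List (List String)) (deep : Bool), Dom_get_raw_keywords_candidates tokens_as_morphs tokens_as_morphs_in_morph_rule_format morph_rules_expanded deep → Spec_get_raw_keywords_candidates tokens_as_morphs tokens_as_morphs_in_morph_rule_format morph_rules_expanded deep (get_raw_keywords_candidates tokens_as_morphs tokens_as_morphs_in_morph_rule_format morph_rules_expanded deep)

-- ===== LEMMAS AND PROOFS =====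

-- A's scan of a block T₁ of rules that all have length L: it appends one toks-slice per
-- occurrence of the fmt-slice in T₁ (and, when not deep, stops at the first one).
theorem pvAInner_block (toks fmt : List String) (deep : Bool) (i L : Int)
    (T₁ T₂ : List (List String)) (hL : ∀ r ∈ T₁, (r.length : Int) = L) :
    ∀ acc, pvAInner toks fmt deep i acc (T₁ ++ T₂) =
      if deep then
        pvAInner toks fmt deep i
          (acc ++ List.replicate (T₁.count (PySem.List.slice fmt (some i) (some (i + L))))
            (PySem.List.slice toks (some i) (some (i + L)))) T₂
      else if 0 < T₁.count (PySem.List.slice fmt (some i) (some (i + L))) then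
        (acc ++ [PySem.List.slice toks (some i) (some (i + L))], i + L - 1)
      else pvAInner toks fmt deep i acc T₂ := by
  induction T₁ with
  | nil =>
    intro acc
    cases deep <;> simp
  | cons r T₁' ih =>
    intro acc
    have hrL : (r.length : Int) = L := hL r (by simp)
    have hL' : ∀ x ∈ T₁', (x.length : Int) = L := fun x hx => hL x (by simp [hx])
    simp only [List.cons_append, pvAInner, match_morph_rule, hrL]
    by_cases hkey : PySem.List.slice fmt (some i) (some (i + L)) = r
    · rw [← hkey]
      simp only [beq_self_eq_true, if_true]
      cases deep with
      | false =>
        simp [List.count_cons_self]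
      | true =>
        simp only [Bool.not_true, Bool.false_eq_true, if_false, ih hL']
        simp [List.count_cons_self, List.replicate_succ, List.append_assoc]
    · have hbeq : ((PySem.List.slice fmt (some i) (some (i + L))) == r) = false := by
        simpa using hkey
      rw [hbeq]
      simp only [Bool.false_eq_true, if_false, ih hL']
      rw [List.count_cons_of_ne (Ne.symm hkey)]

-- a length-nonincreasing rule list splits into its maximal-length prefix and a strictly shorter tail
theorem split_max (L : Int) :
    ∀ T : List (List String),
      T.Pairwise (fun a b => (b.length : Int) ≤ (a.length : Int)) →
      (∀ r ∈ T, (r.length : Int) ≤ L) →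
      ∃ T₁ T₂, T = T₁ ++ T₂ ∧ (∀ r ∈ T₁, (r.length : Int) = L) ∧
        (∀ r ∈ T₂, (r.length : Int) < L) ∧
        T₂.Pairwise (fun a b => (b.length : Int) ≤ (a.length : Int)) := by
  intro T
  induction T with
  | nil => intro _ _; exact ⟨[], [], rfl, by simp, by simp, List.Pairwise.nil⟩
  | cons r T' ih =>
    intro hp hle
    have hp' := (List.pairwise_cons.mp hp).2
    have hhead := (List.pairwise_cons.mp hp).1
    by_cases hr : (r.length : Int) = L
    · obtain ⟨T₁, T₂, heq, h1, h2, h3⟩ := ih hp' (fun x hx => hle x (by simp [hx]))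
      exact ⟨r :: T₁, T₂, by simp [heq], by
        intro x hx; rcases List.mem_cons.mp hx with h | h
        · rw [h]; exact hr
        · exact h1 x h, h2, h3⟩
    · have hrlt : (r.length : Int) < L := lt_of_le_of_ne (hle r (by simp)) hr
      refine ⟨[], r :: T', by simp, by simp, ?_, hp⟩
      intro x hx
      rcases List.mem_cons.mp hx with h | h
      · rw [h]; exact hrlt
      · exact lt_of_le_of_lt (by exact_mod_cast hhead x h) hrlt

-- deep step: A's scan of a length-nonincreasing rule list T appends exactly B's
-- per-position comprehension block and leaves i unchanged
theorem step_deep (toks fmt : List String) (counts : PySem.Dict (List String) Int) (i : Int) :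
    ∀ (Ls : List Int) (T : List (List String)),
      T.Pairwise (fun a b => (b.length : Int) ≤ (a.length : Int)) →
      Ls.Pairwise (fun a b => b < a) →
      (∀ r ∈ T, (r.length : Int) ∈ Ls) →
      (∀ r : List String, (r.length : Int) ∈ Ls → counts.getD r 0 = (T.count r : Int)) →
      ∀ acc, pvAInner toks fmt true i acc T = (acc ++ pvBDeepAt toks fmt counts Ls i, i) := by
  intro Ls
  induction Ls with
  | nil =>
    intro T _ _ h3 _ acc
    cases T with
    | nil => simp [pvAInner, pvBDeepAt]
    | cons r T' => exact absurd (h3 r (by simp)) (by simp)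
  | cons L rest ih =>
    intro T h1 h2 h3 h4 acc
    have hrestlt : ∀ x ∈ rest, x < L := fun x hx => (List.pairwise_cons.mp h2).1 x hx
    have h2' := (List.pairwise_cons.mp h2).2
    have hTle : ∀ r ∈ T, (r.length : Int) ≤ L := by
      intro r hr
      rcases List.mem_cons.mp (h3 r hr) with h | h
      · exact le_of_eq h
      · exact le_of_lt (hrestlt _ h)
    obtain ⟨T₁, T₂, heq, hT₁, hT₂, hT₂p⟩ := split_max L T h1 hTle
    have h3' : ∀ r ∈ T₂, (r.length : Int) ∈ rest := by
      intro r hr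
      rcases List.mem_cons.mp (h3 r (heq ▸ List.mem_append_right T₁ hr)) with h | h
      · exact absurd h (ne_of_lt (hT₂ r hr))
      · exact h
    have hcount : ∀ r : List String, (r.length : Int) ∈ rest → T.count r = T₂.count r := by
      intro r hr
      have hnot : r ∉ T₁ := fun hmem => absurd (hT₁ r hmem) (ne_of_lt (hrestlt _ hr))
      rw [heq, List.count_append, List.count_eq_zero_of_not_mem hnot, Nat.zero_add]
    have h4' : ∀ r : List String, (r.length : Int) ∈ rest → counts.getD r 0 = (T₂.count r : Int) := by
      intro r hr; rw [h4 r (by simp [hr]), hcount r hr]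
    rw [heq, pvAInner_block toks fmt true i L T₁ T₂ hT₁ acc]
    simp only [if_true, ih T₂ hT₂p h2' h3' h4']
    -- the head block of B's comprehension equals A's replicate over the block T₁
    have hhead : List.replicate
        (if ((PySem.List.slice fmt (some i) (some (i + L))).length : Int) = L
         then (counts.getD (PySem.List.slice fmt (some i) (some (i + L))) 0).toNat else 0)
        (PySem.List.slice toks (some i) (some (i + L)))
        = List.replicate (T₁.count (PySem.List.slice fmt (some i) (some (i + L))))
            (PySem.List.slice toks (some i) (some (i + L))) := by
      by_cases hkl : ((PySem.List.slice fmt (some i) (some (i + L))).length : Int) = L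
      · have hT₂c : T₂.count (PySem.List.slice fmt (some i) (some (i + L))) = 0 :=
          List.count_eq_zero_of_not_mem (fun hmem => absurd hkl (ne_of_lt (hT₂ _ hmem)))
        have hc : counts.getD (PySem.List.slice fmt (some i) (some (i + L))) 0
            = (T₁.count (PySem.List.slice fmt (some i) (some (i + L))) : Int) := by
          rw [h4 _ (by simp [hkl]), heq, List.count_append, hT₂c, Nat.add_zero]
        simp [hkl, hc]
      · have hzero : T₁.count (PySem.List.slice fmt (some i) (some (i + L))) = 0 :=
          List.count_eq_zero_of_not_mem (fun hmem => hkl (hT₁ _ hmem))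
        simp [hkl, hzero]
    simp [pvBDeepAt, hhead, List.append_assoc]

-- non-deep step: A's scan of T equals B's probe for the first (= longest) matching length
theorem step_greedy (toks fmt : List String) (counts : PySem.Dict (List String) Int) (i : Int) :
    ∀ (Ls : List Int) (T : List (List String)),
      T.Pairwise (fun a b => (b.length : Int) ≤ (a.length : Int)) →
      Ls.Pairwise (fun a b => b < a) →
      (∀ r ∈ T, (r.length : Int) ∈ Ls) →
      (∀ r : List String, (r.length : Int) ∈ Ls → counts.getD r 0 = (T.count r : Int)) →
      ∀ acc, pvAInner toks fmt false i acc T =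
        match pvBFind fmt counts Ls i with
        | none => (acc, i)
        | some L => (acc ++ [PySem.List.slice toks (some i) (some (i + L))], i + L - 1) := by
  intro Ls
  induction Ls with
  | nil =>
    intro T _ _ h3 _ acc
    cases T with
    | nil => simp [pvAInner, pvBFind]
    | cons r T' => exact absurd (h3 r (by simp)) (by simp)
  | cons L rest ih =>
    intro T h1 h2 h3 h4 acc
    have hrestlt : ∀ x ∈ rest, x < L := fun x hx => (List.pairwise_cons.mp h2).1 x hx
    have h2' := (List.pairwise_cons.mp h2).2
    have hTle : ∀ r ∈ T, (r.length : Int) ≤ L := by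
      intro r hr
      rcases List.mem_cons.mp (h3 r hr) with h | h
      · exact le_of_eq h
      · exact le_of_lt (hrestlt _ h)
    obtain ⟨T₁, T₂, heq, hT₁, hT₂, hT₂p⟩ := split_max L T h1 hTle
    have h3' : ∀ r ∈ T₂, (r.length : Int) ∈ rest := by
      intro r hr
      rcases List.mem_cons.mp (h3 r (heq ▸ List.mem_append_right T₁ hr)) with h | h
      · exact absurd h (ne_of_lt (hT₂ r hr))
      · exact h
    have hcount : ∀ r : List String, (r.length : Int) ∈ rest → T.count r = T₂.count r := by
      intro r hr
      have hnot : r ∉ T₁ := fun hmem => absurd (hT₁ r hmem) (ne_of_lt (hrestlt _ hr))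
      rw [heq, List.count_append, List.count_eq_zero_of_not_mem hnot, Nat.zero_add]
    have h4' : ∀ r : List String, (r.length : Int) ∈ rest → counts.getD r 0 = (T₂.count r : Int) := by
      intro r hr; rw [h4 r (by simp [hr]), hcount r hr]
    rw [heq, pvAInner_block toks fmt false i L T₁ T₂ hT₁ acc]
    by_cases hkl : ((PySem.List.slice fmt (some i) (some (i + L))).length : Int) = L
    · have hT₂c : T₂.count (PySem.List.slice fmt (some i) (some (i + L))) = 0 :=
        List.count_eq_zero_of_not_mem (fun hmem => absurd hkl (ne_of_lt (hT₂ _ hmem)))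
      have hc : counts.getD (PySem.List.slice fmt (some i) (some (i + L))) 0
          = (T₁.count (PySem.List.slice fmt (some i) (some (i + L))) : Int) := by
        rw [h4 _ (by simp [hkl]), heq, List.count_append, hT₂c, Nat.add_zero]
      by_cases hzero : T₁.count (PySem.List.slice fmt (some i) (some (i + L))) = 0
      · have hcz : counts.getD (PySem.List.slice fmt (some i) (some (i + L))) 0 = 0 := by
          rw [hc, hzero]; rfl
        simp only [if_false, hzero, Nat.lt_irrefl]
        rw [ih T₂ hT₂p h2' h3' h4' acc]
        simp [pvBFind, hkl, hcz]
      · rw [if_neg Bool.false_ne_true, if_pos (Nat.pos_of_ne_zero hzero)]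
        have hcnz : (counts.getD (PySem.List.slice fmt (some i) (some (i + L))) 0 != 0) = true := by
          rw [hc]; simpa using hzero
        simp [pvBFind, hkl, hcnz]
    · have hzero : T₁.count (PySem.List.slice fmt (some i) (some (i + L))) = 0 :=
        List.count_eq_zero_of_not_mem (fun hmem => hkl (hT₁ _ hmem))
      simp only [if_false, hzero, Nat.lt_irrefl]
      rw [ih T₂ hT₂p h2' h3' h4' acc]
      simp [pvBFind, hkl]

-- the non-deep while loops run in lockstep (same fuel, same position updates)
theorem loop_greedy (toks fmt : List String) (rules : List (List String))
    (counts : PySem.Dict (List String) Int) (lengths : List Int)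
    (hstep : ∀ i acc, pvAInner toks fmt false i acc rules =
      match pvBFind fmt counts lengths i with
      | none => (acc, i)
      | some L => (acc ++ [PySem.List.slice toks (some i) (some (i + L))], i + L - 1)) :
    ∀ fuel i acc, pvALoop toks fmt rules false fuel i acc
      = acc ++ pvBGreedy toks fmt counts lengths fuel i := by
  intro fuel
  induction fuel with
  | zero => intro i acc; simp [pvALoop, pvBGreedy]
  | succ fuel ih =>
    intro i acc
    simp only [pvALoop, pvBGreedy, Int.lt_add_one_iff, hstep]
    by_cases hi : i ≤ (toks.length : Int)
    · rw [if_pos hi, if_pos hi]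
      cases hfind : pvBFind fmt counts lengths i with
      | none => simpa using ih (i + 1) acc
      | some L =>
        have : i + L - 1 + 1 = i + L := by ring
        simp only [this, ih (i + L) (acc ++ [PySem.List.slice toks (some i) (some (i + L))])]
        simp
    · rw [if_neg hi, if_neg hi]; simp

-- the deep loop: A walks i = start, start+1, … once each (i is never moved by the inner
-- for when deep), producing exactly B's comprehension over the remaining range
theorem loop_deep (toks fmt : List String) (rules : List (List String))
    (counts : PySem.Dict (List String) Int) (lengths : List Int)
    (hstep : ∀ i acc, pvAInner toks fmt true i acc rules
      = (acc ++ pvBDeepAt toks fmt counts lengths i, i)) :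
    ∀ fuel (i : Int) acc, ((toks.length : Int) + 1 - i).toNat ≤ fuel →
      pvALoop toks fmt rules true fuel i acc
        = acc ++ (PySem.List.pyRange i ((toks.length : Int) + 1) 1).flatMap
            (pvBDeepAt toks fmt counts lengths) := by
  intro fuel
  induction fuel with
  | zero =>
    intro i acc h
    have hge : (toks.length : Int) + 1 ≤ i := by omega
    simp [pvALoop, PySem.List.pyRange_one_eq_nil hge]
  | succ fuel ih =>
    intro i acc h
    simp only [pvALoop, hstep]
    by_cases hi : i < (toks.length : Int) + 1
    · rw [if_pos hi, ih (i + 1) (acc ++ pvBDeepAt toks fmt counts lengths i) (by omega)]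
      rw [PySem.List.pyRange_one_cons hi]
      simp [List.append_assoc]
    · have hge : (toks.length : Int) + 1 ≤ i := by omega
      rw [if_neg hi]
      simp [PySem.List.pyRange_one_eq_nil hge]

-- ===== VERDICT (by name: the statement is the Claim_ definition above) =====
theorem get_raw_keywords_candidates_spec : Claim_equal_get_raw_keywords_candidates := by
  intro toks fmt rules deep _
  unfold Spec_get_raw_keywords_candidates
  unfold get_raw_keywords_candidates get_raw_keywords_candidates_alt
  have h1 := PySem.List.sorted_pairwise_rev rules (fun r => (r.length : Int))
  have h2 : (pvBLengths rules).Pairwise (fun a b => b < a) := by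
    have hnd : (pvBLengths rules).Nodup :=
      (PySem.List.sorted_perm _ _ _).nodup_iff.mpr (PySem.Set.nodup_ofList _)
    have hle := PySem.List.sorted_pairwise_rev
      (PySem.Set.ofList (rules.map (fun r => (r.length : Int)))) (fun x => x)
    exact (hle.and hnd).imp (fun h => lt_of_le_of_ne h.1 (Ne.symm h.2))
  have h3 : ∀ r ∈ PySem.List.sorted rules (fun r => (r.length : Int)) true,
      (r.length : Int) ∈ pvBLengths rules := by
    intro r hr
    rw [pvBLengths, PySem.List.mem_sorted, PySem.Set.mem_ofList]
    exact List.mem_map_of_mem ((PySem.List.mem_sorted _ _ _ _).mp hr)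
  have h4 : ∀ r : List String, (r.length : Int) ∈ pvBLengths rules →
      (pvBCounts rules).getD r 0
        = ((PySem.List.sorted rules (fun r => (r.length : Int)) true).count r : Int) := by
    intro r _
    rw [pvBCounts, PySem.Dict.getD_foldl_insert_add_one, PySem.Dict.getD_empty, zero_add]
    exact_mod_cast (List.Perm.count_eq (PySem.List.sorted_perm rules _ _) r).symm
  cases deep with
  | false =>
    simp only [Bool.false_eq_true, if_false]
    rw [loop_greedy toks fmt _ (pvBCounts rules) (pvBLengths rules)
      (fun i acc => step_greedy toks fmt (pvBCounts rules) i (pvBLengths rules) _ h1 h2 h3 h4 acc)]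
    simp
  | true =>
    simp only [if_true]
    rw [loop_deep toks fmt _ (pvBCounts rules) (pvBLengths rules)
      (fun i acc => step_deep toks fmt (pvBCounts rules) i (pvBLengths rules) _ h1 h2 h3 h4 acc)
      (toks.length + 2) 0 [] (by omega)]
    simp
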